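-- pv_equiv track=rewrite | github.com/cybercryptixcoder/Synapse_001 | prompt/harness/run_harness.py | assert_tool_speech_order
-- ===== SOURCE A (Python) =====
-- from typing import Any, Dict, List
--
-- def assert_tool_speech_order(events: List[Dict[str, Any]]) -> List[str]:
--     issues = []
--     spoke_since_tool = False
--     seen_assistant_speech = False
--     for idx, ev in enumerate(events):
--         if ev.get("type") == "speech" and ev.get("role") == "assistant":
--             spoke_since_tool = True
--             seen_assistant_speech = True
--         if ev.get("type") == "tool_call":
--             if not spoke_since_tool:
--                 issues.append(f"Tool call at event {idx+1} not preceded by assistant speech")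
--             spoke_since_tool = False
--     if not seen_assistant_speech:
--         issues.append("No assistant speech found in session")
--     return issues
-- ===== SOURCE B (Python) =====
-- from typing import Any, Dict, List
--
-- def assert_tool_speech_order(events: List[Dict[str, Any]]) -> List[str]:
--     # Index-table formulation: collect assistant-speech indices once, then for each
--     # tool call ask whether some speech index lies strictly between the previous
--     # tool call and this one.
--     speeches = [i for i, ev in enumerate(events)
--                 if ev.get("type") == "speech" and ev.get("role") == "assistant"]
--     issues = []
--     prev = -1
--     for idx, ev in enumerate(events):
--         if ev.get("type") == "tool_call":
--             if not any(prev < s < idx for s in speeches):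
--                 issues.append(f"Tool call at event {idx+1} not preceded by assistant speech")
--             prev = idx
--     if not speeches:
--         issues.append("No assistant speech found in session")
--     return issues
-- ===== Notes on version B (the rewrite author's own statement) =====
-- stated objective: alternative
-- what changed: Replaces the carried spoke_since_tool/seen_assistant_speech boolean flags with a precomputed list of assistant-speech indices, queried per tool call for an index strictly between the previous tool call and the current one; the final 'no speech' issue becomes emptiness of that list.
import Mathlib
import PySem

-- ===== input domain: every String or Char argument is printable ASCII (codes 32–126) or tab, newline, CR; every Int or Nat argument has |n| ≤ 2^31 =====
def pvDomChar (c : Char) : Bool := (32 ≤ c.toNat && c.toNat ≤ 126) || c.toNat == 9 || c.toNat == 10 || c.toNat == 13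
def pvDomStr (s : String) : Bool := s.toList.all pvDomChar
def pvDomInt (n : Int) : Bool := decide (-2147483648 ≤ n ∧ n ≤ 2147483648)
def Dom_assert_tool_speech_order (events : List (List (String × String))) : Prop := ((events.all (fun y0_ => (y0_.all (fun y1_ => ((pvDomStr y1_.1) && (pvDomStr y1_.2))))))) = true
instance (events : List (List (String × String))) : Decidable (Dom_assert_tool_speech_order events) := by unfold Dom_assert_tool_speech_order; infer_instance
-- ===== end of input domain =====

-- B replaces A's carried boolean flags by a precomputed assistant-speech index list
-- queried per tool call (alternative decomposition; return values proved identical).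

-- ===== PORT A =====
-- ev.get(k): first-match association-list lookup (Python dict has unique keys)
def evGet : List (String × String) → String → Option String
  | [], _ => none
  | (k, v) :: rest, key => if k == key then some v else evGet rest key

def isSpeech (ev : List (String × String)) : Bool :=
  (evGet ev "type" == some "speech") && (evGet ev "role" == some "assistant")

def isTool (ev : List (String × String)) : Bool :=
  evGet ev "type" == some "tool_call"

def toolMsg (idx : Int) : String :=
  "Tool call at event " ++ PySem.Int.toStr (idx + 1) ++ " not preceded by assistant speech"

def noSpeechMsg : String := "No assistant speech found in session"

-- A's single loop: state (issues, spoke_since_tool, seen_assistant_speech)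
def aLoop : List (List (String × String)) → Int → List String → Bool → Bool → List String × Bool
  | [], _, issues, _, seen => (issues, seen)
  | ev :: rest, idx, issues, spoke, seen =>
    let spoke1 := if isSpeech ev then true else spoke
    let seen1 := if isSpeech ev then true else seen
    if isTool ev then
      aLoop rest (idx + 1) (if spoke1 then issues else issues ++ [toolMsg idx]) false seen1
    else
      aLoop rest (idx + 1) issues spoke1 seen1

def assert_tool_speech_order (events : List (List (String × String))) : List String :=
  let r := aLoop events 0 [] false false
  if r.2 then r.1 else r.1 ++ [noSpeechMsg]

-- ===== PORT B =====
-- [i for i, ev in enumerate(events) if ev.get("type")=="speech" and ev.get("role")=="assistant"]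
def speechIdx (events : List (List (String × String))) : List Int :=
  ((PySem.List.enumerate events).filter (fun p => isSpeech p.2)).map (fun p => p.1)

-- B's loop over tool calls: prev = index of previous tool call (-1 initially)
def bLoop : List (List (String × String)) → Int → List Int → List String → Int → List String
  | [], _, _, issues, _ => issues
  | ev :: rest, idx, speeches, issues, prev =>
    if isTool ev then
      bLoop rest (idx + 1) speeches
        (if speeches.any (fun s => decide (prev < s) && decide (s < idx)) then issues
         else issues ++ [toolMsg idx]) idx
    else
      bLoop rest (idx + 1) speeches issues prev

def assert_tool_speech_order_alt (events : List (List (String × String))) : List String :=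
  let speeches := speechIdx events
  let issues := bLoop events 0 speeches [] (-1)
  if speeches.isEmpty then issues ++ [noSpeechMsg] else issues

-- ===== PRECONDITION & SPEC =====
def Spec_assert_tool_speech_order (events : List (List (String × String))) (out : List String) : Prop := out = assert_tool_speech_order_alt events
instance (events : List (List (String × String))) (out : List String) : Decidable (Spec_assert_tool_speech_order events out) := by unfold Spec_assert_tool_speech_order; infer_instance

-- ===== CLAIM (what is proved, stated in full; the proofs are below) =====
def Claim_equal_assert_tool_speech_order : Prop := ∀ (events : List (List (String × String))), Dom_assert_tool_speech_order events → Spec_assert_tool_speech_order events (assert_tool_speech_order events)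

-- ===== LEMMAS AND PROOFS =====

-- proof-side reference: indices (from offset k) of assistant-speech events
def spFrom (k : Int) : List (List (String × String)) → List Int
  | [] => []
  | ev :: rest => if isSpeech ev then k :: spFrom (k + 1) rest else spFrom (k + 1) rest

lemma spFrom_ge (evs : List (List (String × String))) : ∀ (k s : Int), s ∈ spFrom k evs → k ≤ s := by
  induction evs with
  | nil => intro k s h; simp [spFrom] at h
  | cons ev rest ih =>
    intro k s h
    simp only [spFrom] at h
    split at h
    · rcases List.mem_cons.1 h with h | h
      · omega
      · have := ih (k + 1) s h; omega
    · have := ih (k + 1) s h; omega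

lemma speechIdx_eq_spFrom (events : List (List (String × String))) :
    speechIdx events = spFrom 0 events := by
  suffices h : ∀ (evs : List (List (String × String))) (k : Int),
      ((PySem.List.enumerate evs k).filter (fun p => isSpeech p.2)).map (fun p => p.1) = spFrom k evs by
    simpa [speechIdx] using h events 0
  intro evs
  induction evs with
  | nil => intro k; simp [PySem.List.enumerate_nil, spFrom]
  | cons ev rest ih =>
    intro k
    simp only [PySem.List.enumerate_cons, spFrom, List.filter_cons]
    by_cases h : isSpeech ev <;> simp [h, ih (k + 1)]

lemma speech_not_tool (ev : List (String × String)) (h : isSpeech ev = true) : isTool ev = false := by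
  simp only [isSpeech, Bool.and_eq_true, beq_iff_eq] at h
  simp [isTool, h.1]

lemma any_between_self (S : List Int) (c : Int) :
    (S.any (fun s => decide (c < s) && decide (s < c + 1))) = false := by
  induction S with
  | nil => rfl
  | cons x xs ih =>
    simp only [List.any_cons, ih, Bool.or_false]
    simp only [Bool.and_eq_false_iff, decide_eq_false_iff_not]
    omega

lemma any_lt_succ (S : List Int) (c : Int) (h : c ∉ S) :
    (S.any (fun s => decide (s < c + 1))) = S.any (fun s => decide (s < c)) := by
  induction S with
  | nil => rfl
  | cons x xs ih =>
    have hx : x ≠ c := fun he => h (he ▸ List.mem_cons_self)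
    have hxs : c ∉ xs := fun hm => h (List.mem_cons_of_mem _ hm)
    simp only [List.any_cons, ih hxs]
    have : (decide (x < c + 1)) = (decide (x < c)) := by
      by_cases hlt : x < c <;> simp [hlt] <;> omega
    rw [this]

lemma any_between_succ (S : List Int) (p c : Int) (h : c ∉ S) :
    (S.any (fun s => decide (p < s) && decide (s < c + 1)))
      = S.any (fun s => decide (p < s) && decide (s < c)) := by
  induction S with
  | nil => rfl
  | cons x xs ih =>
    have hx : x ≠ c := fun he => h (he ▸ List.mem_cons_self)
    have hxs : c ∉ xs := fun hm => h (List.mem_cons_of_mem _ hm)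
    simp only [List.any_cons, ih hxs]
    have : (decide (x < c + 1)) = (decide (x < c)) := by
      by_cases hlt : x < c <;> simp [hlt] <;> omega
    rw [this]

lemma any_true_of_all (S : List Int) (p : Int → Bool) (h : ∀ s ∈ S, p s = true) :
    S.any p = !S.isEmpty := by
  cases S with
  | nil => rfl
  | cons x xs => simp [List.any_cons, h x List.mem_cons_self]

lemma loop_eq (evs : List (List (String × String))) :
    ∀ (idx prev : Int) (issues : List String) (spoke seen : Bool) (S : List Int),
      (∀ j : Int, idx ≤ j → (j ∈ S ↔ j ∈ spFrom idx evs)) →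
      spoke = S.any (fun s => decide (prev < s) && decide (s < idx)) →
      seen = S.any (fun s => decide (s < idx)) →
      prev < idx →
      aLoop evs idx issues spoke seen = (bLoop evs idx S issues prev, !S.isEmpty) := by
  induction evs with
  | nil =>
    intro idx prev issues spoke seen S hmem hspoke hseen _
    have hall : ∀ s ∈ S, (decide (s < idx)) = true := by
      intro s hs
      by_contra hlt
      have hge : idx ≤ s := by simpa using hlt
      exact absurd ((hmem s hge).1 hs) (by simp [spFrom])
    simp [aLoop, bLoop, hseen, any_true_of_all S _ hall]
  | cons ev rest ih =>
    intro idx prev issues spoke seen S hmem hspoke hseen hprev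
    by_cases hs : isSpeech ev = true
    · -- assistant speech event: not a tool call
      have ht := speech_not_tool ev hs
      have hmem' : ∀ j : Int, idx + 1 ≤ j → (j ∈ S ↔ j ∈ spFrom (idx + 1) rest) := by
        intro j hj
        rw [hmem j (by omega)]
        simp only [spFrom, hs, if_pos, List.mem_cons]
        constructor
        · rintro (h | h)
          · omega
          · exact h
        · exact Or.inr
      have hidxS : idx ∈ S := by
        rw [hmem idx le_rfl]; simp [spFrom, hs]
      have hspoke' : true = S.any (fun s => decide (prev < s) && decide (s < idx + 1)) := by
        symm
        rw [List.any_eq_true]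
        exact ⟨idx, hidxS, by simp; omega⟩
      have hseen' : true = S.any (fun s => decide (s < idx + 1)) := by
        symm
        rw [List.any_eq_true]
        exact ⟨idx, hidxS, by simp⟩
      simp only [aLoop, bLoop, hs, ht, if_true, if_false, Bool.false_eq_true]
      exact ih (idx + 1) prev issues true true S hmem' hspoke' hseen' (by omega)
    · -- not an assistant-speech event
      have hns : isSpeech ev = false := by simpa using hs
      have hidxS : (idx : Int) ∉ S := by
        rw [hmem idx le_rfl]
        simp only [spFrom, hns, Bool.false_eq_true, if_false]
        intro hin
        have := spFrom_ge rest (idx + 1) idx hin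
        omega
      have hmem' : ∀ j : Int, idx + 1 ≤ j → (j ∈ S ↔ j ∈ spFrom (idx + 1) rest) := by
        intro j hj
        rw [hmem j (by omega)]
        simp [spFrom, hns]
      have hseen' : seen = S.any (fun s => decide (s < idx + 1)) := by
        rw [any_lt_succ S idx hidxS]; exact hseen
      by_cases ht : isTool ev = true
      · -- tool call event
        have hspoke' : false = S.any (fun s => decide (idx < s) && decide (s < idx + 1)) := by
          rw [any_between_self]
        simp only [aLoop, bLoop, hns, ht, if_true, Bool.false_eq_true, if_false, ← hspoke]
        exact ih (idx + 1) idx _ false seen S hmem' hspoke' hseen' (by omega)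
      · -- neither speech nor tool
        have hnt : isTool ev = false := by simpa using ht
        have hspoke' : spoke = S.any (fun s => decide (prev < s) && decide (s < idx + 1)) := by
          rw [any_between_succ S prev idx hidxS]; exact hspoke
        simp only [aLoop, bLoop, hns, hnt, Bool.false_eq_true, if_false]
        exact ih (idx + 1) prev issues spoke seen S hmem' hspoke' hseen' (by omega)

-- ===== VERDICT (by name: the statement is the Claim_ definition above) =====
theorem assert_tool_speech_order_spec : Claim_equal_assert_tool_speech_order := by
  intro events _
  unfold Spec_assert_tool_speech_order assert_tool_speech_order assert_tool_speech_order_alt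
  rw [speechIdx_eq_spFrom]
  have hmem : ∀ j : Int, (0 : Int) ≤ j → (j ∈ spFrom 0 events ↔ j ∈ spFrom 0 events) :=
    fun _ _ => Iff.rfl
  have hspoke : false = (spFrom 0 events).any (fun s => decide (-1 < s) && decide (s < 0)) := by
    symm
    rw [List.any_eq_false]
    intro s hsm
    have h0 : ¬ s < 0 := by have := spFrom_ge events 0 s hsm; omega
    simp [h0]
  have hseen : false = (spFrom 0 events).any (fun s => decide (s < 0)) := by
    symm
    rw [List.any_eq_false]
    intro s hsm
    have h0 : ¬ s < 0 := by have := spFrom_ge events 0 s hsm; omega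
    simp [h0]
  rw [loop_eq events 0 (-1) [] false false (spFrom 0 events) hmem hspoke hseen (by omega)]
  cases h : (spFrom 0 events).isEmpty <;> simp only [h, Bool.not_true, Bool.not_false, if_true, if_false, Bool.false_eq_true]
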